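-- pv_equiv track=rewrite | github.com/elevenisrising/SubGenie | src/translation/llm_translate.py | clean_srt_content
-- ===== SOURCE A (Python) =====
-- def clean_srt_content(content: str) -> str:
--     """Clean up SRT content to remove hallucinations and extra text."""
--     lines = content.split('\n')
--     cleaned_lines = []
--     in_srt_block = False
--
--     for line in lines:
--         line = line.strip()
--
--         # Skip empty lines at the beginning
--         if not line and not in_srt_block:
--             continue
--
--         # Check if line looks like subtitle index (just a number)
--         if line.isdigit():
--             in_srt_block = True
--             cleaned_lines.append(line)
--             continue
--
--         # Check if line looks like timestamp
--         if '-->' in line and ':' in line: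
--             in_srt_block = True
--             cleaned_lines.append(line)
--             continue
--
--         # If we're in SRT block and it's subtitle content
--         if in_srt_block:
--             # Keep the line if it looks like subtitle content
--             cleaned_lines.append(line)
--
--         # Add empty line after subtitle content
--         if line == '' and cleaned_lines and cleaned_lines[-1] != '':
--             cleaned_lines.append(line)
--
--     return '\n'.join(cleaned_lines)
-- ===== SOURCE B (Python) =====
-- def clean_srt_content(content: str) -> str:
--     """Locate the first SRT-looking line (index or timestamp) and return the stripped suffix from there."""
--     lines = [l.strip() for l in content.split('\n')]
--     for i, l in enumerate(lines):
--         if l.isdigit() or ('-->' in l and ':' in l):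
--             return '\n'.join(lines[i:])
--     return ''
-- ===== Notes on version B (the rewrite author's own statement) =====
-- stated objective: simpler
-- what changed: Replaces the stateful incremental-append loop (in_srt_block flag, trailing empty-line branch) with locate-the-first-SRT-line-then-take-suffix: strip all lines once, find the first index/timestamp line, join the suffix (or return '' if none).
import Mathlib
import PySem

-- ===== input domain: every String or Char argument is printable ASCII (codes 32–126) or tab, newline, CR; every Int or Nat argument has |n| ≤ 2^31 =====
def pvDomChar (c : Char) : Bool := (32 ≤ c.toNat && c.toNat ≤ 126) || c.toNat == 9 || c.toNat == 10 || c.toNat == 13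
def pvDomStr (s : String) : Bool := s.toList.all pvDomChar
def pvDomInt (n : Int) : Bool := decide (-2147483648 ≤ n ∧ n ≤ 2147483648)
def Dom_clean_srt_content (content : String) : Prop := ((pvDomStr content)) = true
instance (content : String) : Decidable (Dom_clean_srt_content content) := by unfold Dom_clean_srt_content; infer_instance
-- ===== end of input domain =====

-- B replaces A's stateful append loop with find-first-SRT-line-then-join-suffix (simpler decomposition).

-- ===== PORT A =====
-- A's for-loop, state = (cleaned_lines, in_srt_block); split? "\n" is always `some` (sep ≠ ""), so getD [] is exact
def pvALoop : List String → List String → Bool → List String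
  | [], acc, _ => acc
  | l :: rest, acc, inBlk =>
    let s := PySem.Str.strip l
    if s == "" && !inBlk then pvALoop rest acc inBlk
    else if PySem.Str.strIsdigit s then pvALoop rest (acc ++ [s]) true
    else if PySem.Str.isIn "-->" s && PySem.Str.isIn ":" s then pvALoop rest (acc ++ [s]) true
    else
      let acc2 := if inBlk then acc ++ [s] else acc
      let acc3 := if s == "" && !acc2.isEmpty && !(acc2.getLast? == some "") then acc2 ++ [s] else acc2
      pvALoop rest acc3 inBlk

def clean_srt_content (content : String) : String :=
  PySem.Str.join "\n" (pvALoop ((PySem.Str.split? content "\n").getD []) [] false)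

-- ===== PORT B =====
def pvIsSrtLine (l : String) : Bool :=
  PySem.Str.strIsdigit l || (PySem.Str.isIn "-->" l && PySem.Str.isIn ":" l)

def clean_srt_content_alt (content : String) : String :=
  let lines := ((PySem.Str.split? content "\n").getD []).map PySem.Str.strip
  match lines.findIdx? pvIsSrtLine with
  | some i => PySem.Str.join "\n" (lines.drop i)
  | none => ""

-- ===== PRECONDITION & SPEC =====
def Spec_clean_srt_content (content : String) (out : String) : Prop := out = clean_srt_content_alt content
instance (content : String) (out : String) : Decidable (Spec_clean_srt_content content out) := by unfold Spec_clean_srt_content; infer_instance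

-- ===== CLAIM (what is proved, stated in full; the proofs are below) =====
def Claim_equal_clean_srt_content : Prop := ∀ (content : String), Dom_clean_srt_content content → Spec_clean_srt_content content (clean_srt_content content)

-- ===== LEMMAS AND PROOFS =====

-- once in_srt_block is true, every stripped line is appended exactly once
theorem pvALoop_true (ls : List String) : ∀ acc, pvALoop ls acc true = acc ++ ls.map PySem.Str.strip := by
  induction ls with
  | nil => intro acc; simp [pvALoop]
  | cons l rest ih =>
    intro acc
    show pvALoop (l :: rest) acc true = acc ++ (PySem.Str.strip l :: rest.map PySem.Str.strip)
    unfold pvALoop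
    set s := PySem.Str.strip l with hs
    simp only [Bool.not_true, Bool.and_false, Bool.false_eq_true, if_false]
    by_cases hd : PySem.Str.strIsdigit s
    · rw [if_pos hd, ih]; simp
    · rw [if_neg hd]
      by_cases ht : (PySem.Str.isIn "-->" s && PySem.Str.isIn ":" s) = true
      · rw [if_pos ht, ih]; simp
      · rw [if_neg ht]
        by_cases he : s = ""
        · simp [he, ih]
        · simp [he, ih]

-- before the first SRT-looking line, the loop keeps an empty accumulator and drops everything
theorem pvALoop_false (ls : List String) :
    pvALoop ls [] false =
      match (ls.map PySem.Str.strip).findIdx? pvIsSrtLine with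
      | some i => (ls.map PySem.Str.strip).drop i
      | none => [] := by
  induction ls with
  | nil => simp [pvALoop]
  | cons l rest ih =>
    simp only [List.map_cons, List.findIdx?_cons]
    unfold pvALoop
    set s := PySem.Str.strip l with hs
    by_cases hp : pvIsSrtLine s
    · simp only [hp, if_true]
      have hnz : (s == "" && !(false : Bool)) = false := by
        have : s ≠ "" := by
          intro he
          rw [he] at hp
          exact absurd hp (by decide)
        simp [this]
      rw [hnz]
      simp only [Bool.false_eq_true, if_false]
      by_cases hd : PySem.Str.strIsdigit s
      · rw [if_pos hd, pvALoop_true]; simp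
      · have ht : (PySem.Str.isIn "-->" s && PySem.Str.isIn ":" s) = true := by
          unfold pvIsSrtLine at hp
          rcases Bool.or_eq_true_iff.mp hp with h | h
          · exact absurd h hd
          · exact h
        rw [if_neg hd, if_pos ht, pvALoop_true]; simp
    · simp only [hp]
      have hd : PySem.Str.strIsdigit s = false := by
        revert hp; unfold pvIsSrtLine; cases PySem.Str.strIsdigit s <;> simp
      have ht : (PySem.Str.isIn "-->" s && PySem.Str.isIn ":" s) = false := by
        revert hp; unfold pvIsSrtLine
        cases h : (PySem.Str.isIn "-->" s && PySem.Str.isIn ":" s) <;> simp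
      by_cases he : s = ""
      · rw [if_pos (by simp [he])]
        rw [ih]
        cases (rest.map PySem.Str.strip).findIdx? pvIsSrtLine <;> simp
      · rw [if_neg (by simp [he]), hd, ht]
        simp only [Bool.false_eq_true, if_false]
        rw [if_neg (by simp)]
        rw [ih]
        cases (rest.map PySem.Str.strip).findIdx? pvIsSrtLine <;> simp

-- ===== VERDICT (by name: the statement is the Claim_ definition above) =====
theorem clean_srt_content_spec : Claim_equal_clean_srt_content := by
  intro content _
  unfold Spec_clean_srt_content clean_srt_content clean_srt_content_alt
  dsimp only
  rw [pvALoop_false]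
  cases (((PySem.Str.split? content "\n").getD []).map PySem.Str.strip).findIdx? pvIsSrtLine
  · rfl
  · rfl
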